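-- pv_equiv track=rewrite | github.com/JannesStroehlein/ServerNetwork | util/icons.py | get_icon
-- ===== SOURCE A (Python) =====
-- def get_icon(name: str, use_svg : bool, icons : dict[str, list[str]]):
--     """
--     Get the icon for a service
--     :param name: The name of the service
--     :param use_svg: Whether to prefer SVG icons
--     :param icons: The icons
--     :return: The icon
--     """
--
--     if use_svg and any(icon.lower().endswith('.svg') for icon in icons[name]):
--         for icon in icons[name]:
--             if icon.endswith('.svg'):
--                 return icon
--
--     for i, icon in enumerate(icons[name]):
--         if not icon.endswith('.svg'):
--             return icon
--
--     raise ValueError(f'No valid icon found for {name} in {icons[name]}')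
-- ===== SOURCE B (Python) =====
-- def get_icon(name: str, use_svg : bool, icons : dict[str, list[str]]):
--     """Single pass over icons[name] tracking the first SVG and first non-SVG icon."""
--     first_svg = None
--     first_non_svg = None
--     for icon in icons[name]:
--         if icon.endswith('.svg'):
--             if first_svg is None:
--                 first_svg = icon
--         elif first_non_svg is None:
--             first_non_svg = icon
--     if use_svg and first_svg is not None:
--         return first_svg
--     if first_non_svg is not None:
--         return first_non_svg
--     raise ValueError(f'No valid icon found for {name} in {icons[name]}')
-- ===== Notes on version B (the rewrite author's own statement) =====
-- stated objective: simpler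
-- what changed: Replaces A's any()-scan plus two separate return-loops (up to three traversals of icons[name]) with one pass that records the first SVG and first non-SVG icon and then picks between them; the case-insensitive any() check is dropped because it never changes the result.
import Mathlib
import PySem

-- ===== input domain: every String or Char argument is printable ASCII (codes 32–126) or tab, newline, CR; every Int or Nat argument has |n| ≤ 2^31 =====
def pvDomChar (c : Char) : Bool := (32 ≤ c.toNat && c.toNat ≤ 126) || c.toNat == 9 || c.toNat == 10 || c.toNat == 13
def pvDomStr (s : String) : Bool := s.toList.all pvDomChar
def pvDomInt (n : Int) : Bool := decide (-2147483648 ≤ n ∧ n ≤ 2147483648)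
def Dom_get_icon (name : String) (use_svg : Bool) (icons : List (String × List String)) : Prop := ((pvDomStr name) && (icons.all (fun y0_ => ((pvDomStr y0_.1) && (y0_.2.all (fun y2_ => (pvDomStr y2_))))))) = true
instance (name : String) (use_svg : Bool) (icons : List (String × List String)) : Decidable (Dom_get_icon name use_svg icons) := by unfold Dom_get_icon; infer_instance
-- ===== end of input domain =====

-- B replaces A's any()-scan plus two separate return-loops with one pass recording the
-- first SVG and first non-SVG icon (objective: simpler). Pre_ excludes exactly the inputs
-- where the Python A raises (KeyError / ValueError); the Python B raises there too.

-- ===== PORT A =====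
-- icons[name]: dict lookup = first match in the association list (Pre_ excludes a missing key)
def pyDictGet (icons : List (String × List String)) (name : String) : List String :=
  ((icons.find? (fun p => p.1 == name)).map Prod.snd).getD []

-- the second for-loop and the final raise (the raise path is excluded by Pre_)
def getIconLoop2 (lst : List String) : String :=
  match lst.find? (fun icon => !(PySem.Str.endswith icon ".svg")) with
  | some icon => icon
  | none => ""  -- raise ValueError: outside Pre_

def get_icon (name : String) (use_svg : Bool) (icons : List (String × List String)) : String :=
  let lst := pyDictGet icons name
  if use_svg && lst.any (fun icon => PySem.Str.endswith (PySem.Str.lower icon) ".svg") then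
    match lst.find? (fun icon => PySem.Str.endswith icon ".svg") with
    | some icon => icon
    | none => getIconLoop2 lst
  else getIconLoop2 lst

-- ===== PORT B =====
-- one fold step: set first_svg / first_non_svg only the first time each is seen
def altStep (st : Option String × Option String) (icon : String) : Option String × Option String :=
  if PySem.Str.endswith icon ".svg" then
    (if st.1.isNone then some icon else st.1, st.2)
  else
    (st.1, if st.2.isNone then some icon else st.2)

def get_icon_alt (name : String) (use_svg : Bool) (icons : List (String × List String)) : String :=
  let lst := ((icons.find? (fun p => p.1 == name)).map Prod.snd).getD []
  let st := lst.foldl altStep (none, none)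
  if use_svg && st.1.isSome then st.1.getD ""
  else
    match st.2 with
    | some icon => icon
    | none => ""  -- raise ValueError: outside Pre_

-- ===== PRECONDITION & SPEC =====
-- Pre_ = exactly the inputs on which Python A returns: the name is present, and the
-- list holds a usable icon (a '.svg' icon when use_svg, or any non-'.svg' icon).
def Pre_get_icon (name : String) (use_svg : Bool) (icons : List (String × List String)) : Prop :=
  (icons.find? (fun p => p.1 == name)).isSome = true ∧
  ((use_svg = true ∧ (((icons.find? (fun p => p.1 == name)).map Prod.snd).getD []).any
      (fun icon => PySem.Str.endswith icon ".svg") = true) ∨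
   (((icons.find? (fun p => p.1 == name)).map Prod.snd).getD []).any
      (fun icon => !(PySem.Str.endswith icon ".svg")) = true)
instance (name : String) (use_svg : Bool) (icons : List (String × List String)) : Decidable (Pre_get_icon name use_svg icons) := by unfold Pre_get_icon; infer_instance

def pvWitness_get_icon : String × Bool × (List (String × List String)) :=
  ("web", true, [("web", ["a.png", "b.svg"])])

def Spec_get_icon (name : String) (use_svg : Bool) (icons : List (String × List String)) (out : String) : Prop := out = get_icon_alt name use_svg icons
instance (name : String) (use_svg : Bool) (icons : List (String × List String)) (out : String) : Decidable (Spec_get_icon name use_svg icons out) := by unfold Spec_get_icon; infer_instance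

-- ===== CLAIM (what is proved, stated in full; the proofs are below) =====
def Claim_equal_get_icon : Prop := ∀ (name : String) (use_svg : Bool) (icons : List (String × List String)), Dom_get_icon name use_svg icons → Pre_get_icon name use_svg icons → Spec_get_icon name use_svg icons (get_icon name use_svg icons)

-- ===== LEMMAS AND PROOFS =====

-- the fold computes the first match of each predicate
theorem foldl_altStep (lst : List String) (a b : Option String) :
    lst.foldl altStep (a, b) =
      (a.or (lst.find? (fun icon => PySem.Str.endswith icon ".svg")),
       b.or (lst.find? (fun icon => !(PySem.Str.endswith icon ".svg")))) := by
  induction lst generalizing a b with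
  | nil => simp
  | cons x tl ih =>
    rw [List.foldl_cons, ih]
    cases hx : PySem.Str.endswith x ".svg" <;> cases a <;> cases b <;>
      simp [altStep, hx, Option.or, -PySem.Str.endswith_eq]

-- a case-sensitive '.svg' suffix survives lowercasing
theorem lower_endswith_svg (s : String) (h : PySem.Str.endswith s ".svg" = true) :
    PySem.Str.endswith (PySem.Str.lower s) ".svg" = true := by
  rw [PySem.Str.endswith_eq] at h ⊢
  rw [PySem.Chars.endswith_iff] at h ⊢
  rw [PySem.Str.toList_lower]
  have : PySem.Chars.lower ".svg".toList <:+ PySem.Chars.lower s.toList := by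
    simpa [PySem.Chars.lower] using List.IsSuffix.map _ h
  simpa [PySem.Chars.lower] using this

-- if some icon ends with '.svg', A's any()-guard is true
theorem any_ci_of_find (lst : List String) (i : String)
    (h : lst.find? (fun icon => PySem.Str.endswith icon ".svg") = some i) :
    lst.any (fun icon => PySem.Str.endswith (PySem.Str.lower icon) ".svg") = true := by
  have hm := List.find?_some h
  have hmem := List.mem_of_find?_eq_some h
  exact List.any_eq_true.2 ⟨i, hmem, lower_endswith_svg i hm⟩

-- ===== VERDICT (by name: the statement is the Claim_ definition above) =====
theorem get_icon_spec : Claim_equal_get_icon := by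
  intro name use_svg icons _ _
  unfold Spec_get_icon get_icon get_icon_alt getIconLoop2 pyDictGet
  simp only [foldl_altStep, Option.none_or]
  set lst := ((icons.find? (fun p => p.1 == name)).map Prod.snd).getD [] with hlst
  cases hf : lst.find? (fun icon => PySem.Str.endswith icon ".svg") with
  | none =>
    cases use_svg <;> cases hn : lst.find? (fun icon => !(PySem.Str.endswith icon ".svg")) <;>
      simp [-PySem.Str.endswith_eq]
  | some i =>
    have hci := any_ci_of_find lst i hf
    cases use_svg with
    | false =>
      cases hn : lst.find? (fun icon => !(PySem.Str.endswith icon ".svg")) <;>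
        simp [-PySem.Str.endswith_eq]
    | true => simp [hci, -PySem.Str.endswith_eq]
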